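-- pv_equiv track=rewrite | github.com/alexisg24/learning-python | 04-listas/15-ejercicio.py | repeated_chars
-- ===== SOURCE A (Python) =====
-- def count_repeated_words(str: str):
--     res = {}
--     for word in str.strip().replace(' ', ""):
--         if word in res:
--             res[word] += 1
--         else:
--             res[word] = 1
--     return res
--
-- def repeated_chars(str: str, no=4):
--     values_array = count_repeated_words(str.upper())
--     count_repeated_chars = list(
--         filter(lambda elem: elem[1] >= no, values_array.items()))
--     res = ''
--     for word in count_repeated_chars:
--         res += f'- {word[0]} \n'
--     return res
-- ===== SOURCE B (Python) =====
-- def repeated_chars(str, no=4):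
--     # Recursive deletion: take the first remaining char, count it as the
--     # number of elements removed when deleting all its occurrences, recurse
--     # on the shrunken list. No frequency table and no re-scan of the full string.
--     def go(chars):
--         if not chars:
--             return ''
--         ch = chars[0]
--         rest = [c for c in chars if c != ch]
--         line = f'- {ch} \n' if len(chars) - len(rest) >= no else ''
--         return line + go(rest)
--     return go(list(str.upper().strip().replace(' ', '')))
-- ===== Notes on version B (the rewrite author's own statement) =====
-- stated objective: alternative
-- what changed: Replaces A's build-a-frequency-dict-then-filter-its-items strategy with a recursive deletion algorithm: take the first remaining character, delete all its occurrences, read its count off the length drop, and recurse on the shrunken list; no counter table or items pass exists.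
import Mathlib
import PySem

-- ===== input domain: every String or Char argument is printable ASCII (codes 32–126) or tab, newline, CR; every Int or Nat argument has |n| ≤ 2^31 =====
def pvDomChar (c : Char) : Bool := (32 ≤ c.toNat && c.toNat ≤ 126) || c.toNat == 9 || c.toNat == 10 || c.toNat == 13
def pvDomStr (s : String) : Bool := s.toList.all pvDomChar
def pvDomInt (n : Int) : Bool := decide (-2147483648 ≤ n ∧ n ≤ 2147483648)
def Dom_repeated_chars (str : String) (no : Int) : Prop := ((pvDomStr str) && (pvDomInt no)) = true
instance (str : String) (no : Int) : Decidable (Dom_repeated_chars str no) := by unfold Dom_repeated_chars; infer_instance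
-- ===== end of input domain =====

-- B replaces A's frequency-dict-then-filter with a recursive deletion algorithm (take the first
-- remaining char, count it as the length drop when deleting its occurrences, recurse); alternative.

-- ===== PORT A =====
def count_repeated_words (s : String) : PySem.Dict Char Int :=
  (PySem.Str.replace (PySem.Str.strip s) " " "").toList.foldl
    (fun d c => if d.contains c then d.insert c (d.getD c 0 + 1) else d.insert c 1)
    PySem.Dict.empty

def repeated_chars (str : String) (no : Int) : String :=
  let values_array := count_repeated_words (PySem.Str.upper str)
  let count_repeated_chars := values_array.items.filter (fun p => decide (no ≤ p.2))
  count_repeated_chars.foldl (fun res p => res ++ "- " ++ String.singleton p.1 ++ " \n") ""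

-- ===== PORT B =====
-- inner helper 'go' of Source B: delete all occurrences of the head char, recurse on the rest
def pvGo (no : Int) : List Char → String
  | [] => ""
  | ch :: tl =>
    let rest := (ch :: tl).filter (fun c => !(c == ch))
    (if no ≤ ((ch :: tl).length : Int) - (rest.length : Int)
      then "- " ++ String.singleton ch ++ " \n" else "") ++ pvGo no rest
termination_by l => l.length
decreasing_by
  simp only [List.filter_cons, beq_self_eq_true, Bool.not_true, List.length_cons]
  exact Nat.lt_succ_of_le (List.length_filter_le _ _)

def repeated_chars_alt (str : String) (no : Int) : String :=
  pvGo no (PySem.Str.replace (PySem.Str.strip (PySem.Str.upper str)) " " "").toList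

-- ===== PRECONDITION & SPEC =====
def Spec_repeated_chars (str : String) (no : Int) (out : String) : Prop := out = repeated_chars_alt str no
instance (str : String) (no : Int) (out : String) : Decidable (Spec_repeated_chars str no out) := by unfold Spec_repeated_chars; infer_instance

-- ===== CLAIM =====
def Claim_equal_repeated_chars : Prop := ∀ (str : String) (no : Int), Dom_repeated_chars str no → Spec_repeated_chars str no (repeated_chars str no)


-- ===== LEMMAS AND PROOFS =====

-- concatenation of a list of strings, spine for both sides
def pvCat : List String → String
  | [] => ""
  | s :: ss => s ++ pvCat ss

-- the common per-character line function
def pvF (no : Int) (l : List Char) (c : Char) : String :=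
  if no ≤ (l.count c : Int) then "- " ++ String.singleton c ++ " \n" else ""

theorem pvCat_map_ite {α : Type} (P : α → Prop) [DecidablePred P] (t : α → String) (l : List α) :
    pvCat (l.map (fun c => if P c then t c else ""))
      = pvCat ((l.filter (fun c => decide (P c))).map t) := by
  induction l with
  | nil => rfl
  | cons x xs ih =>
    by_cases h : P x
    · simp [pvCat, h, ih]
    · simp [pvCat, h, ih, String.empty_append]

theorem foldl_append_eq_pvCat {α : Type} (g : α → String) (l : List α) (a : String) :
    l.foldl (fun res x => res ++ g x) a = a ++ pvCat (l.map g) := by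
  induction l generalizing a with
  | nil => simp [pvCat, String.append_empty]
  | cons x xs ih => simp [pvCat, ih, String.append_assoc]

-- A's insert-based counting loop is exactly the Counter loop.
theorem crw_eq_counter (s : String) :
    count_repeated_words s
      = PySem.Dict.counter (PySem.Str.replace (PySem.Str.strip s) " " "").toList := by
  unfold count_repeated_words
  rw [← PySem.Dict.foldl_insert_getD_add_one_eq_counter]
  congr 1
  funext d c
  by_cases h : d.contains c = true
  · simp [h]
  · have hn : d.get? c = none := by
      have := PySem.Dict.contains_eq_isSome_get? (d := d) (k := c)
      cases hg : d.get? c with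
      | none => rfl
      | some v => rw [hg] at this; simp [this] at h
    simp [h, PySem.Dict.getD, hn]

-- Set-building skips elements already absorbed by the accumulator prefix.
theorem set_foldl_add_prefix {α : Type} [BEq α] [LawfulBEq α] (l : List α) (a s : List α) :
    List.foldl PySem.Set.add (a ++ s) l
      = a ++ List.foldl PySem.Set.add s (l.filter (fun c => !(a.contains c))) := by
  induction l generalizing s with
  | nil => rfl
  | cons x xs ih =>
    by_cases h : x ∈ a
    · have hc : a.contains x = true := by simpa using h
      have habs : PySem.Set.add (a ++ s) x = a ++ s := by
        simp [PySem.Set.add, h]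
      simp only [List.foldl_cons, habs, List.filter_cons, hc, Bool.not_true, if_neg Bool.false_ne_true]
      exact ih s
    · have hc : a.contains x = false := by simpa using h
      have hstep : PySem.Set.add (a ++ s) x = a ++ PySem.Set.add s x := by
        by_cases hs : x ∈ s <;> simp [PySem.Set.add, h, hs]
      simp only [List.foldl_cons, hstep, List.filter_cons, hc, Bool.not_false]
      exact ih (PySem.Set.add s x)

-- first-occurrence dedup peels its head and drops the head's duplicates
theorem dedup_cons (x : Char) (xs : List Char) :
    PySem.List.dedup (x :: xs)
      = x :: PySem.List.dedup (xs.filter (fun c => !(c == x))) := by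
  have h0 : PySem.List.dedup (x :: xs) = List.foldl PySem.Set.add ([x] ++ []) xs := rfl
  rw [h0, set_foldl_add_prefix]
  have : (xs.filter (fun c => !([x].contains c))) = xs.filter (fun c => !(c == x)) := by
    apply List.filter_congr
    intro c _
    by_cases h : c = x <;> simp [h]
  rw [this]
  rfl

-- deleting the head's occurrences removes exactly count-many elements
theorem filter_ne_length (tl : List Char) (ch : Char) :
    (tl.filter (fun c => !(c == ch))).length + tl.count ch = tl.length := by
  rw [← List.countP_eq_length_filter, List.count_eq_countP]
  have h := List.length_eq_countP_add_countP (p := fun c => (c == ch)) (l := tl)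
  rw [show (fun a => decide (¬(fun c => (c == ch)) a = true)) = (fun c : Char => !(c == ch)) from
    funext fun a => by by_cases h : a = ch <;> simp [h]] at h
  omega

-- counts of survivors are unchanged by deleting the head's occurrences
theorem count_filter_ne (c x : Char) (l : List Char) (h : (c == x) = false) :
    (l.filter (fun d => !(d == x))).count c = l.count c := by
  rw [List.count_filter]
  simp [h]

-- B's recursion computes the dedup/count normal form
theorem pvGo_eq_cat (no : Int) (l : List Char) :
    pvGo no l = pvCat ((PySem.List.dedup l).map (pvF no l)) := by
  induction l using pvGo.induct with
  | case1 => rw [pvGo]; rfl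
  | case2 ch tl rest ih =>
    have hfil : (ch :: tl).filter (fun c => !(c == ch)) = tl.filter (fun c => !(c == ch)) := by
      simp
    have hrest : rest = tl.filter (fun c => !(c == ch)) := by
      simp [rest]
    rw [hrest] at ih
    have hlen := filter_ne_length tl ch
    have hcount : ((ch :: tl).length : Int)
        - ((tl.filter (fun c => !(c == ch))).length : Int) = ((ch :: tl).count ch : Int) := by
      rw [List.count_cons_self]
      simp only [List.length_cons]
      omega
    have hmap : (PySem.List.dedup (tl.filter (fun c => !(c == ch)))).map (pvF no (ch :: tl))
        = (PySem.List.dedup (tl.filter (fun c => !(c == ch)))).map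
            (pvF no (tl.filter (fun c => !(c == ch)))) := by
      apply List.map_congr_left
      intro c hc
      have hcmem : c ∈ tl.filter (fun c => !(c == ch)) := (PySem.List.mem_dedup _ _).mp hc
      have hne : (c == ch) = false := by
        have := List.of_mem_filter hcmem
        simpa using this
      unfold pvF
      rw [count_filter_ne c ch tl hne,
        List.count_cons_of_ne (Ne.symm (by simpa using hne))]
    rw [pvGo]
    simp only [hfil]
    rw [dedup_cons, List.map_cons, hmap, ih, hcount]
    rfl

-- ===== VERDICT =====
theorem repeated_chars_spec : Claim_equal_repeated_chars := by
  intro str no _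
  show repeated_chars str no = repeated_chars_alt str no
  have hA : repeated_chars str no
      = ((count_repeated_words (PySem.Str.upper str)).items.filter
          (fun p => decide (no ≤ p.2))).foldl
          (fun res p => res ++ "- " ++ String.singleton p.1 ++ " \n") "" := rfl
  have hB : repeated_chars_alt str no
      = pvGo no (PySem.Str.replace (PySem.Str.strip (PySem.Str.upper str)) " " "").toList := rfl
  rw [hA, hB, crw_eq_counter, PySem.Dict.items_counter, ← PySem.List.dedup_eq_ofList,
    pvGo_eq_cat, List.filter_map]
  rw [show (fun (res : String) (p : Char × Int) => res ++ "- " ++ String.singleton p.1 ++ " \n")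
      = (fun (res : String) (p : Char × Int) => res ++ ("- " ++ String.singleton p.1 ++ " \n")) from
    funext fun res => funext fun p => by simp only [String.append_assoc]]
  rw [foldl_append_eq_pvCat, String.empty_append, List.map_map]
  rw [show (pvF no (PySem.Str.replace (PySem.Str.strip (PySem.Str.upper str)) " " "").toList)
      = (fun c => if no ≤ (((PySem.Str.replace (PySem.Str.strip (PySem.Str.upper str)) " " "").toList.count c : Int))
          then "- " ++ String.singleton c ++ " \n" else "") from rfl]
  rw [pvCat_map_ite]
  congr 1
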